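-- pv_equiv track=rewrite | github.com/tkieft/adventofcode-2020 | day11/day11.py | part2
-- ===== SOURCE A (Python) =====
-- def copyArea(area):
--     return [row.copy() for row in area]
--
-- def neighbors2(area, y, x):
--     result = 0
--
--     for i in range(-1, 2):
--         for j in range(-1, 2):
--             if i == 0 and j == 0: continue
--
--             yy = y + i
--             xx = x + j
--             while True:
--                 if yy < 0 or yy >= len(area): break
--                 if xx < 0 or xx >= len(area[yy]): break
--                 if area[yy][xx] == '#':
--                     result += 1
--                     break
--                 if area[yy][xx] == 'L':
--                     break
--                 yy += i
--                 xx += j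
--
--     return result
--
-- def part2(area):
--     while True:
--         previous = copyArea(area)
--
--         for y, row in enumerate(previous):
--             for x, seat in enumerate(row):
--                 if seat == '.': continue
--
--                 n = neighbors2(previous, y, x)
--                 if seat == '#' and n >= 5:
--                     area[y][x] = 'L'
--                 elif seat == 'L' and n == 0:
--                     area[y][x] = '#'
--
--         if previous == area:
--             return sum(row.count('#') for row in area)
-- ===== SOURCE B (Python) =====
-- def part2(area):
--     # Different data structure: the simulation state is a SET of occupied seat
--     # coordinates over a fixed seat list with a precomputed visibility table;
--     # the grid is never touched after the preprocessing pass (A mutates `area`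
--     # in place -- equivalence is about the return value only).
--     dirs = ((-1, -1), (-1, 0), (-1, 1), (0, -1), (0, 1), (1, -1), (1, 0), (1, 1))
--
--     def first_seat(y, x, dy, dx):
--         yy, xx = y + dy, x + dx
--         while 0 <= yy < len(area) and 0 <= xx < len(area[yy]):
--             if area[yy][xx] == '#' or area[yy][xx] == 'L':
--                 return (yy, xx)
--             yy += dy
--             xx += dx
--         return None
--
--     seats = [(y, x) for y, row in enumerate(area)
--                     for x, s in enumerate(row) if s == '#' or s == 'L']
--     adj = [[c for c in (first_seat(y, x, d[0], d[1]) for d in dirs) if c is not None]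
--            for (y, x) in seats]
--     occupied = {p for p in seats if area[p[0]][p[1]] == '#'}
--
--     while True:
--         def stays(p, ns):
--             n = sum(1 for q in ns if q in occupied)
--             return n < 5 if p in occupied else n == 0
--         new = {z[0] for z in zip(seats, adj) if stays(z[0], z[1])}
--         if new == occupied:
--             return len(occupied)
--         occupied = new
-- ===== Notes on version B (the rewrite author's own statement) =====
-- stated objective: faster
-- what changed: B simulates over a different data structure: one preprocessing pass builds a fixed seat list with each seat's first-visible-seat coordinates in the 8 directions, and the loop then iterates a set of occupied seat coordinates to a fixpoint (each step only counts adjacency-table members of the set, with no ray walking and no grid), finally returning the set's size; every simulation step drops from ray-walking all cells to O(1) lookups per seat.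
import Mathlib
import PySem

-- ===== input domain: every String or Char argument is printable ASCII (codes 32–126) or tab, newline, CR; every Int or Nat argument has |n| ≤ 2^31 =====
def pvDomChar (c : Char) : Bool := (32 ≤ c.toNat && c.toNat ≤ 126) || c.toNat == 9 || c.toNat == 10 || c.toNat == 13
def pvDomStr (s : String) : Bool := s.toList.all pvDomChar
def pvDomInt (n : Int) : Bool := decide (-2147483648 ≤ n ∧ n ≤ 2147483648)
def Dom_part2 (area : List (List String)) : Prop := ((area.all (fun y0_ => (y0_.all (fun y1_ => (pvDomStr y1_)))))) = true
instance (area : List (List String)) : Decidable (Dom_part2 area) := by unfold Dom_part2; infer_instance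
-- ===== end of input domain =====

-- B simulates over a different data structure: a fixed seat list with a precomputed
-- visibility table, whose state is the SET of occupied seat coordinates — the grid is
-- only read during preprocessing, and the per-step pass does no ray walking; A mutates
-- `area` in place while B does not, so the equivalence proved here is about the return
-- value only.
--
-- Ray walks and the `while True` fixpoint loops are ported with a fuel guard that only
-- makes the recursion total: the ray fuel exceeds the number of in-grid steps a ray can
-- take, and the loop fuel 2^#cells+1 exceeds the number of iterations of any run of the
-- Python that terminates (each cell stays fixed or moves inside {'#','L'}, so there are
-- at most 2^#cells reachable states, and both loops step through the same state
-- sequence, so at equal fuel both ports return the count of the same configuration).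

-- ===== PORT A =====

-- shared fuel bound for one directional ray walk: a ray moves by (i,j) ≠ (0,0) each step,
-- so it leaves the bounds after at most rows + (longest row) steps
def pvRayFuel (area : List (List String)) : Nat :=
  area.length + (area.map (fun r => r.length)).foldl max 0 + 2

-- the inner `while True` of neighbors2: returns 1 if the first seat seen in direction
-- (i, j) from (yy, xx) is '#', else 0
def pvRayA (area : List (List String)) (i j : Int) : Nat → Int → Int → Int
  | 0, _, _ => 0  -- unreachable: fuel exceeds the number of in-bounds steps
  | fuel + 1, yy, xx =>
    if yy < 0 ∨ (area.length : Int) ≤ yy then 0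
    else
      let row := PySem.List.pyGetD area yy []
      if xx < 0 ∨ (row.length : Int) ≤ xx then 0
      else
        let c := PySem.List.pyGetD row xx ""
        if c = "#" then 1
        else if c = "L" then 0
        else pvRayA area i j fuel (yy + i) (xx + j)

def neighbors2 (area : List (List String)) (y x : Int) : Int :=
  (PySem.List.pyRange (-1) 2 1).foldl (fun acc i =>
    (PySem.List.pyRange (-1) 2 1).foldl (fun acc j =>
      if i = 0 ∧ j = 0 then acc
      else acc + pvRayA area i j (pvRayFuel area) (y + i) (x + j)) acc) 0

-- one pass of the `for y, row in enumerate(previous)` loops: all reads are from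
-- `previous`, every write area[y][x] = v is at the position being visited, so the
-- mutated `area` is this map over `previous`
def pvStepA (previous : List (List String)) : List (List String) :=
  (PySem.List.enumerate previous 0).map (fun yr =>
    (PySem.List.enumerate yr.2 0).map (fun xs =>
      if xs.2 = "." then xs.2
      else
        let n := neighbors2 previous yr.1 xs.1
        if xs.2 = "#" ∧ 5 ≤ n then "L"
        else if xs.2 = "L" ∧ n = 0 then "#"
        else xs.2))

-- the `while True:` loop (fuel-guarded; see header note)
def pvLoopA : Nat → List (List String) → Int
  | 0, area => (area.map (fun row => PySem.List.count row "#")).sum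
  | fuel + 1, area =>
    let next := pvStepA area
    if next = area then (next.map (fun row => PySem.List.count row "#")).sum
    else pvLoopA fuel next

def part2 (area : List (List String)) : Int :=
  pvLoopA (2 ^ (area.map (fun r => r.length)).sum + 1) area

-- ===== PORT B =====

def pvDirsB : List (Int × Int) :=
  [(-1, -1), (-1, 0), (-1, 1), (0, -1), (0, 1), (1, -1), (1, 0), (1, 1)]

-- first_seat: the `while 0 <= yy < len(area) and 0 <= xx < len(area[yy])` walk
-- (fuel-guarded; the shared fuel bound exceeds the number of in-bounds steps)
def pvFirstSeat (area : List (List String)) (dy dx : Int) : Nat → Int → Int → Option (Int × Int)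
  | 0, _, _ => none  -- unreachable
  | fuel + 1, yy, xx =>
    if 0 ≤ yy ∧ yy < (area.length : Int) ∧
       0 ≤ xx ∧ xx < ((PySem.List.pyGetD area yy []).length : Int) then
      if PySem.List.pyGetD (PySem.List.pyGetD area yy []) xx "" = "#" ∨
         PySem.List.pyGetD (PySem.List.pyGetD area yy []) xx "" = "L" then some (yy, xx)
      else pvFirstSeat area dy dx fuel (yy + dy) (xx + dx)
    else none

-- seats = [(y, x) for y, row in enumerate(area) for x, s in enumerate(row) if s in '#L']
def pvSeats (area : List (List String)) : List (Int × Int) :=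
  (PySem.List.enumerate area 0).flatMap (fun yr =>
    ((PySem.List.enumerate yr.2 0).filter (fun xs => xs.2 == "#" || xs.2 == "L")).map
      (fun xs => (yr.1, xs.1)))

-- adj = [[c for c in (first_seat(y, x, d[0], d[1]) for d in dirs) if c is not None] ...]
def pvAdj (area : List (List String)) : List (List (Int × Int)) :=
  (pvSeats area).map (fun p =>
    pvDirsB.filterMap (fun d =>
      pvFirstSeat area d.1 d.2 (pvRayFuel area) (p.1 + d.1) (p.2 + d.2)))

-- occupied = {p for p in seats if area[p[0]][p[1]] == '#'}
def pvOcc0 (area : List (List String)) : PySem.Set (Int × Int) :=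
  PySem.Set.ofList ((pvSeats area).filter (fun p =>
    PySem.List.pyGetD (PySem.List.pyGetD area p.1 []) p.2 "" == "#"))

-- stays(p, ns): n = sum(1 for q in ns if q in occupied); n < 5 if p in occupied else n == 0
def pvStays (occ : PySem.Set (Int × Int)) (p : Int × Int) (ns : List (Int × Int)) : Bool :=
  let n : Int := ((ns.filter (fun q => PySem.Set.contains occ q)).map (fun _ => (1 : Int))).sum
  if PySem.Set.contains occ p then decide (n < 5) else decide (n = 0)

-- new = {z[0] for z in zip(seats, adj) if stays(z[0], z[1])}
def pvNewSet (seats : List (Int × Int)) (adj : List (List (Int × Int)))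
    (occ : PySem.Set (Int × Int)) : PySem.Set (Int × Int) :=
  PySem.Set.ofList (((seats.zip adj).filter (fun z => pvStays occ z.1 z.2)).map (fun z => z.1))

-- the `while True:` loop over the occupied-set state (fuel-guarded; see header note)
def pvLoopB (seats : List (Int × Int)) (adj : List (List (Int × Int))) :
    Nat → PySem.Set (Int × Int) → Int
  | 0, occ => PySem.Set.len occ
  | fuel + 1, occ =>
    let new := pvNewSet seats adj occ
    if PySem.Set.equal new occ then PySem.Set.len occ
    else pvLoopB seats adj fuel new

def part2_alt (area : List (List String)) : Int :=
  pvLoopB (pvSeats area) (pvAdj area) (2 ^ (area.map (fun r => r.length)).sum + 1)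
    (pvOcc0 area)

-- ===== PRECONDITION & SPEC =====
def Spec_part2 (area : List (List String)) (out : Int) : Prop := out = part2_alt area
instance (area : List (List String)) (out : Int) : Decidable (Spec_part2 area out) := by unfold Spec_part2; infer_instance

-- ===== CLAIM =====
def Claim_equal_part2 : Prop := ∀ (area : List (List String)), Dom_part2 area → Spec_part2 area (part2 area)

-- ===== LEMMAS AND PROOFS =====

-- a cell blocks a ray iff it is a seat; seats flip only between '#' and 'L', everything
-- else never changes, so this relation between the initial grid g0 and a current grid g
-- is the invariant of the simulation
def pvIsSeat (s : String) : Bool := s == "#" || s == "L"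

def pvCellRel (a b : String) : Prop := pvIsSeat a = pvIsSeat b ∧ (pvIsSeat a = false → b = a)

def pvSkel (g0 g : List (List String)) : Prop :=
  g.map (fun r => r.length) = g0.map (fun r => r.length) ∧
  ∀ (y x : Nat), pvCellRel (((g0.getD y []).getD x "")) (((g.getD y []).getD x ""))

-- the occupied-seat list of the current grid g (over the fixed seat list of g0);
-- B's loop state is always `PySem.Set.ofList (pvOccL g0 g)`
def pvOccL (g0 g : List (List String)) : List (Int × Int) :=
  (pvSeats g0).filter (fun p =>
    PySem.List.pyGetD (PySem.List.pyGetD g p.1 []) p.2 "" == "#")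

theorem pvSkel_refl (g : List (List String)) : pvSkel g g := by
  refine ⟨rfl, fun y x => ⟨rfl, fun _ => rfl⟩⟩

theorem pvSkel_length {g0 g : List (List String)} (h : pvSkel g0 g) :
    g.length = g0.length := by
  have := congrArg List.length h.1
  simpa using this

theorem pvGetD_len_map (l : List (List String)) (y : Nat) :
    (l.getD y []).length = (l.map (fun r => r.length)).getD y 0 := by
  simp only [List.getD_eq_getElem?_getD, List.getElem?_map]
  cases l[y]? <;> simp

theorem pvSkel_rowlen {g0 g : List (List String)} (h : pvSkel g0 g) (y : Nat) :
    (g.getD y []).length = (g0.getD y []).length := by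
  rw [pvGetD_len_map, pvGetD_len_map, h.1]

theorem pvPyGetD_nonneg {α : Type} (xs : List α) (i : Int) (hi : 0 ≤ i) (d : α) :
    PySem.List.pyGetD xs i d = xs.getD i.toNat d := by
  obtain ⟨n, rfl⟩ := Int.eq_ofNat_of_zero_le hi
  simp

theorem pvGetD2 (l : List (List String)) (y x : Nat) :
    (l[y]?.getD [])[x]?.getD "" = (l.getD y []).getD x "" := by
  rw [← List.getD_eq_getElem?_getD, ← List.getD_eq_getElem?_getD]

theorem pvIsSeat_iff (s : String) : pvIsSeat s = true ↔ s = "#" ∨ s = "L" := by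
  simp [pvIsSeat]

theorem pvIsSeat_false_iff (s : String) : pvIsSeat s = false ↔ s ≠ "#" ∧ s ≠ "L" := by
  simp [pvIsSeat]

theorem pvSkel_rayFuel {g0 g : List (List String)} (h : pvSkel g0 g) :
    pvRayFuel g = pvRayFuel g0 := by
  unfold pvRayFuel
  rw [h.1, pvSkel_length h]

-- A's ray over the current grid computes exactly "first visible seat (over the initial
-- grid) is occupied (in the current grid)"
theorem pvRay_eq_firstSeat {g0 g : List (List String)} (h : pvSkel g0 g) :
    ∀ (fuel : Nat) (i j yy xx : Int),
      pvRayA g i j fuel yy xx =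
        (match pvFirstSeat g0 i j fuel yy xx with
         | some c => if PySem.List.pyGetD (PySem.List.pyGetD g c.1 []) c.2 "" = "#" then 1 else 0
         | none => 0) := by
  intro fuel
  induction fuel with
  | zero => intro i j yy xx; rfl
  | succ f ih =>
    intro i j yy xx
    rw [pvRayA, pvFirstSeat]
    by_cases hy : yy < 0 ∨ (g.length : Int) ≤ yy
    · rw [if_pos hy]
      have hguard : ¬ (0 ≤ yy ∧ yy < (g0.length : Int) ∧
          0 ≤ xx ∧ xx < ((PySem.List.pyGetD g0 yy []).length : Int)) := by
        rw [← pvSkel_length h]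
        rcases hy with hy | hy
        · intro hc; exact absurd hc.1 (by omega)
        · intro hc; exact absurd hc.2.1 (by omega)
      rw [if_neg hguard]
    · rw [if_neg hy]
      push Not at hy
      have hy0 : (0:Int) ≤ yy := hy.1
      have hrl : (PySem.List.pyGetD g yy []).length = (PySem.List.pyGetD g0 yy []).length := by
        rw [pvPyGetD_nonneg _ _ hy0, pvPyGetD_nonneg _ _ hy0]
        exact pvSkel_rowlen h yy.toNat
      simp only
      by_cases hx : xx < 0 ∨ ((PySem.List.pyGetD g yy []).length : Int) ≤ xx
      · rw [if_pos hx]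
        have hguard : ¬ (0 ≤ yy ∧ yy < (g0.length : Int) ∧
            0 ≤ xx ∧ xx < ((PySem.List.pyGetD g0 yy []).length : Int)) := by
          rw [← hrl]
          rcases hx with hx | hx
          · intro hc; exact absurd hc.2.2.1 (by omega)
          · intro hc; exact absurd hc.2.2.2 (by omega)
        rw [if_neg hguard]
      · rw [if_neg hx]
        push Not at hx
        have hx0 : (0:Int) ≤ xx := hx.1
        have hguard : (0 ≤ yy ∧ yy < (g0.length : Int) ∧
            0 ≤ xx ∧ xx < ((PySem.List.pyGetD g0 yy []).length : Int)) := by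
          refine ⟨hy0, ?_, hx0, ?_⟩
          · rw [← pvSkel_length h]; omega
          · rw [← hrl]; omega
        rw [if_pos hguard]
        simp only [pvPyGetD_nonneg _ _ hy0, pvPyGetD_nonneg _ _ hx0]
        have hcell := h.2 yy.toNat xx.toNat
        by_cases hseat : pvIsSeat ((g0.getD yy.toNat []).getD xx.toNat "") = true
        · have hcseat : pvIsSeat ((g.getD yy.toNat []).getD xx.toNat "") = true := by
            rw [← hcell.1]; exact hseat
          rw [if_pos ((pvIsSeat_iff _).1 hseat)]
          rcases (pvIsSeat_iff _).1 hcseat with hc | hc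
          · rw [if_pos hc]
            have hc' : (g[yy.toNat]?.getD [])[xx.toNat]?.getD "" = "#" := by
              rw [pvGetD2]; exact hc
            simp [pvPyGetD_nonneg _ _ hy0, pvPyGetD_nonneg _ _ hx0, hc']
          · have hne : ((g.getD yy.toNat []).getD xx.toNat "") ≠ "#" := by rw [hc]; decide
            rw [if_neg hne, if_pos hc]
            have hne' : ¬ (g[yy.toNat]?.getD [])[xx.toNat]?.getD "" = "#" := by
              rw [pvGetD2]; exact hne
            simp [pvPyGetD_nonneg _ _ hy0, pvPyGetD_nonneg _ _ hx0, hne']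
        · have hF : pvIsSeat ((g0.getD yy.toNat []).getD xx.toNat "") = false := by
            revert hseat; cases pvIsSeat ((g0.getD yy.toNat []).getD xx.toNat "") <;> simp
          have hcc : ((g.getD yy.toNat []).getD xx.toNat "") = ((g0.getD yy.toNat []).getD xx.toNat "") :=
            hcell.2 hF
          obtain ⟨h1, h2⟩ := (pvIsSeat_false_iff _).1 hF
          rw [hcc, if_neg h1, if_neg h2, if_neg (not_or.mpr ⟨h1, h2⟩)]
          exact ih i j (yy + i) (xx + j)

-- membership characterisation of the seat list
theorem pvMem_seats (g0 : List (List String)) (p : Int × Int) :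
    p ∈ pvSeats g0 ↔ ∃ (y x : Nat), p = ((y : Int), (x : Int)) ∧ y < g0.length ∧
      x < (g0.getD y []).length ∧ pvIsSeat ((g0.getD y []).getD x "") = true := by
  unfold pvSeats
  constructor
  · intro hp
    rw [List.mem_flatMap] at hp
    obtain ⟨yr, hyr, hp⟩ := hp
    rw [List.mem_map] at hp
    obtain ⟨xs, hxs, hp⟩ := hp
    rw [List.mem_filter] at hxs
    obtain ⟨hxs, hpred⟩ := hxs
    rw [PySem.List.mem_enumerate_iff] at hyr
    obtain ⟨y, hy, rfl⟩ := hyr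
    rw [PySem.List.mem_enumerate_iff] at hxs
    obtain ⟨x, hx, rfl⟩ := hxs
    refine ⟨y, x, ?_, hy, ?_, ?_⟩
    · rw [← hp]; simp
    · rwa [List.getD_eq_getElem g0 [] hy]
    · rw [List.getD_eq_getElem g0 [] hy, List.getD_eq_getElem _ "" hx]
      simpa [pvIsSeat] using hpred
  · rintro ⟨y, x, rfl, hy, hx, hseat⟩
    rw [List.mem_flatMap]
    refine ⟨((y : Int), g0[y]), ?_, ?_⟩
    · rw [PySem.List.mem_enumerate_iff]
      exact ⟨y, hy, by simp⟩
    · rw [List.mem_map]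
      rw [List.getD_eq_getElem g0 [] hy] at hx hseat
      refine ⟨((x : Int), g0[y][x]), ?_, rfl⟩
      rw [List.mem_filter]
      refine ⟨?_, ?_⟩
      · rw [PySem.List.mem_enumerate_iff]
        exact ⟨x, hx, by simp⟩
      · rw [List.getD_eq_getElem _ "" hx] at hseat
        simpa [pvIsSeat] using hseat
  
-- the seat list has no duplicates
theorem pvSeats_nodup (g0 : List (List String)) : (pvSeats g0).Nodup := by
  unfold pvSeats
  rw [List.nodup_flatMap]
  constructor
  · intro yr _
    have hp : (((PySem.List.enumerate yr.2 0).filter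
        (fun xs => xs.2 == "#" || xs.2 == "L")).map (fun xs => (yr.1, xs.1))).Pairwise
          (fun a b => a.2 < b.2) := by
      apply List.Pairwise.map
      · intro a b hab; exact hab
      · exact (PySem.List.pairwise_lt_enumerate yr.2 0).filter _
    exact hp.imp (fun {a b} hab heq => absurd (congrArg Prod.snd heq) (by exact hab.ne))
  · apply (PySem.List.pairwise_lt_enumerate g0 0).imp
    intro a b hab p hpa hpb
    rw [List.mem_map] at hpa hpb
    obtain ⟨xs, _, hxa⟩ := hpa
    obtain ⟨ys, _, hxb⟩ := hpb
    have : a.1 = b.1 := by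
      have h1 : p.1 = a.1 := by rw [← hxa]
      have h2 : p.1 = b.1 := by rw [← hxb]
      omega
    omega

-- a found first seat is a member of the seat list
theorem pvFirstSeat_mem (g0 : List (List String)) (dy dx : Int) :
    ∀ (fuel : Nat) (yy xx : Int) (c : Int × Int),
      pvFirstSeat g0 dy dx fuel yy xx = some c → c ∈ pvSeats g0 := by
  intro fuel
  induction fuel with
  | zero => intro yy xx c hc; exact absurd hc (by simp [pvFirstSeat])
  | succ f ih =>
    intro yy xx c hc
    rw [pvFirstSeat] at hc
    by_cases hguard : (0 ≤ yy ∧ yy < (g0.length : Int) ∧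
        0 ≤ xx ∧ xx < ((PySem.List.pyGetD g0 yy []).length : Int))
    · rw [if_pos hguard] at hc
      by_cases hseat : PySem.List.pyGetD (PySem.List.pyGetD g0 yy []) xx "" = "#" ∨
          PySem.List.pyGetD (PySem.List.pyGetD g0 yy []) xx "" = "L"
      · rw [if_pos hseat] at hc
        obtain ⟨hy0, hylt, hx0, hxlt⟩ := hguard
        rw [Option.some_inj] at hc
        rw [pvMem_seats]
        refine ⟨yy.toNat, xx.toNat, ?_, by omega, ?_, ?_⟩
        · rw [← hc]; simp [Int.toNat_of_nonneg hy0, Int.toNat_of_nonneg hx0]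
        · rw [pvPyGetD_nonneg _ _ hy0] at hxlt; omega
        · rw [pvPyGetD_nonneg _ _ hy0, pvPyGetD_nonneg _ _ hx0] at hseat
          exact (pvIsSeat_iff _).2 hseat
      · rw [if_neg hseat] at hc
        exact ih _ _ _ hc
    · rw [if_neg hguard] at hc
      exact absurd hc (by simp)

-- reading membership of the current occupied set
theorem pvContains_occ {g0 g : List (List String)} (q : Int × Int) (hq : q ∈ pvSeats g0) :
    PySem.Set.contains (PySem.Set.ofList (pvOccL g0 g)) q =
      (PySem.List.pyGetD (PySem.List.pyGetD g q.1 []) q.2 "" == "#") := by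
  by_cases hc : PySem.List.pyGetD (PySem.List.pyGetD g q.1 []) q.2 "" = "#"
  · have : q ∈ pvOccL g0 g := by
      rw [pvOccL, List.mem_filter]
      exact ⟨hq, by simp [hc]⟩
    rw [(PySem.Set.contains_iff _ _).2 ((PySem.Set.mem_ofList _ _).2 this)]
    simp [hc]
  · have : q ∉ pvOccL g0 g := by
      rw [pvOccL, List.mem_filter]
      intro hmem
      exact hc (by simpa using hmem.2)
    have hcf : PySem.Set.contains (PySem.Set.ofList (pvOccL g0 g)) q = false := by
      cases hcv : PySem.Set.contains (PySem.Set.ofList (pvOccL g0 g)) q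
      · rfl
      · exact absurd ((PySem.Set.mem_ofList _ _).1 ((PySem.Set.contains_iff _ _).1 hcv)) this
    rw [hcf]
    simp [hc]

-- the per-direction decomposition of a filtered filterMap's length
theorem pvLen_filter_filterMap (f : Int × Int → Option (Int × Int)) (pb : Int × Int → Bool) :
    ∀ (ds : List (Int × Int)),
      ((((ds.filterMap f).filter pb).length : Int)) =
        (ds.map (fun d => match f d with
          | some c => if pb c then (1 : Int) else 0
          | none => 0)).sum := by
  intro ds
  induction ds with
  | nil => rfl
  | cons d ds ih =>
    cases hf : f d with
    | none => simp [hf, ih]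
    | some c =>
      simp only [List.filterMap_cons, hf, List.map_cons, List.sum_cons]
      by_cases hp : pb c = true
      · simp [hp, ← ih]; omega
      · simp only [Bool.not_eq_true] at hp
        simp [hp, ← ih]

-- B's adjacency-table count equals A's ray-walk count
set_option maxHeartbeats 1000000 in
theorem pvCount_eq_neighbors {g0 g : List (List String)} (h : pvSkel g0 g) (y x : Int) :
    (((pvDirsB.filterMap (fun d =>
          pvFirstSeat g0 d.1 d.2 (pvRayFuel g0) (y + d.1) (x + d.2))).filter
        (fun q => PySem.Set.contains (PySem.Set.ofList (pvOccL g0 g)) q)).map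
          (fun _ => (1 : Int))).sum = neighbors2 g y x := by
  rw [PySem.List.sum_map_const_int, mul_one]
  have hfc : ((pvDirsB.filterMap (fun d =>
          pvFirstSeat g0 d.1 d.2 (pvRayFuel g0) (y + d.1) (x + d.2))).filter
        (fun q => PySem.Set.contains (PySem.Set.ofList (pvOccL g0 g)) q)) =
      ((pvDirsB.filterMap (fun d =>
          pvFirstSeat g0 d.1 d.2 (pvRayFuel g0) (y + d.1) (x + d.2))).filter
        (fun q => PySem.List.pyGetD (PySem.List.pyGetD g q.1 []) q.2 "" == "#")) := by
    apply List.filter_congr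
    intro q hq
    rw [List.mem_filterMap] at hq
    obtain ⟨d, _, hd⟩ := hq
    exact pvContains_occ q (pvFirstSeat_mem g0 d.1 d.2 _ _ _ _ hd)
  rw [hfc, pvLen_filter_filterMap]
  have hr3 : PySem.List.pyRange (-1) 2 1 = [-1, 0, 1] := by decide
  simp only [neighbors2, hr3, pvDirsB, List.foldl_cons, List.foldl_nil,
    pvRay_eq_firstSeat h, pvSkel_rayFuel h, List.map_cons, List.map_nil, List.sum_cons,
    List.sum_nil]
  have hb : ∀ (c : Int × Int),
      (if (PySem.List.pyGetD (PySem.List.pyGetD g c.1 []) c.2 "" == "#") = true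
        then (1:Int) else 0) =
      (if PySem.List.pyGetD (PySem.List.pyGetD g c.1 []) c.2 "" = "#" then (1:Int) else 0) := by
    intro c; simp
  simp only [hb]
  norm_num
  try simp only [add_assoc]

-- row lengths are unchanged by a step
theorem pvStepA_rowlens (g : List (List String)) :
    (pvStepA g).map (fun r => r.length) = g.map (fun r => r.length) := by
  apply List.ext_getElem?
  intro k
  rw [List.getElem?_map, List.getElem?_map]
  unfold pvStepA
  rw [List.getElem?_map]
  simp only [PySem.List.getElem?_enumerate]
  cases hgk : g[k]? with
  | none => rfl
  | some row => simp [PySem.List.length_enumerate]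

-- indexing the enumerate-map shape
theorem pvEnumMap_getElem? {α β : Type} (xs : List α) (F : Int × α → β) (k : Nat) :
    ((PySem.List.enumerate xs 0).map F)[k]? = xs[k]?.map (fun a => F ((k : Int), a)) := by
  simp [PySem.List.getElem?_enumerate]
  cases xs[k]? <;> simp

-- the cell a step writes at an in-range position
theorem pvCell_stepA (g : List (List String)) (y x : Nat)
    (hy : y < g.length) (hx : x < (g.getD y []).length) :
    ((pvStepA g).getD y []).getD x "" =
      (let seat := (g.getD y []).getD x "";
       let n := neighbors2 g (y : Int) (x : Int);
       if seat = "." then seat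
       else if seat = "#" ∧ 5 ≤ n then "L"
       else if seat = "L" ∧ n = 0 then "#"
       else seat) := by
  have hrow : g[y]? = some (g.getD y []) := by
    rw [List.getElem?_eq_getElem hy, List.getD_eq_getElem g [] hy]
  have hcell : (g.getD y [])[x]? = some ((g.getD y []).getD x "") := by
    rw [List.getElem?_eq_getElem hx, List.getD_eq_getElem _ "" hx]
  have hb : (pvStepA g)[y]? = some ((PySem.List.enumerate (g.getD y []) 0).map (fun xs =>
      if xs.2 = "." then xs.2
      else
        let n := neighbors2 g (y : Int) xs.1
        if xs.2 = "#" ∧ 5 ≤ n then "L"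
        else if xs.2 = "L" ∧ n = 0 then "#"
        else xs.2)) := by
    unfold pvStepA
    rw [pvEnumMap_getElem?, hrow]
    rfl
  have e1 : (pvStepA g).getD y [] = (PySem.List.enumerate (g.getD y []) 0).map (fun xs =>
      if xs.2 = "." then xs.2
      else
        let n := neighbors2 g (y : Int) xs.1
        if xs.2 = "#" ∧ 5 ≤ n then "L"
        else if xs.2 = "L" ∧ n = 0 then "#"
        else xs.2) := by
    rw [List.getD_eq_getElem?_getD, hb]; rfl
  rw [e1]
  have e2 : ((PySem.List.enumerate (g.getD y []) 0).map (fun xs =>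
      if xs.2 = "." then xs.2
      else
        let n := neighbors2 g (y : Int) xs.1
        if xs.2 = "#" ∧ 5 ≤ n then "L"
        else if xs.2 = "L" ∧ n = 0 then "#"
        else xs.2))[x]? = some
        (let seat := (g.getD y []).getD x "";
         let n := neighbors2 g (y : Int) (x : Int);
         if seat = "." then seat
         else if seat = "#" ∧ 5 ≤ n then "L"
         else if seat = "L" ∧ n = 0 then "#"
         else seat) := by
    rw [pvEnumMap_getElem?, hcell]
    rfl
  rw [List.getD_eq_getElem?_getD, e2]
  rfl

-- the value a step writes at one cell keeps the cell relation
theorem pvCellRel_new (c0 seat : String) (n : Int) (hcell : pvCellRel c0 seat) :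
    pvCellRel c0
      (if seat = "." then seat
       else if seat = "#" ∧ 5 ≤ n then "L" else if seat = "L" ∧ n = 0 then "#" else seat) := by
  by_cases hdot : seat = "."
  · simpa [hdot] using hcell
  · rw [if_neg hdot]
    by_cases hs : pvIsSeat seat = true
    · have hr : pvIsSeat
          (if seat = "#" ∧ 5 ≤ n then "L" else if seat = "L" ∧ n = 0 then "#" else seat) = true := by
        split_ifs <;> first | decide | exact hs
      refine ⟨by rw [hcell.1, hs, hr], fun hf => ?_⟩
      rw [hcell.1, hs] at hf
      exact absurd hf (by decide)
    · have hF : pvIsSeat seat = false := by revert hs; cases pvIsSeat seat <;> simp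
      obtain ⟨h1, h2⟩ := (pvIsSeat_false_iff _).1 hF
      simpa [h1, h2] using hcell

-- a step preserves the skeleton invariant
theorem pvSkel_step {g0 g : List (List String)} (h : pvSkel g0 g) :
    pvSkel g0 (pvStepA g) := by
  constructor
  · rw [pvStepA_rowlens, h.1]
  · intro y x
    have hcell := h.2 y x
    by_cases hy : y < g.length
    · by_cases hx : x < (g.getD y []).length
      · rw [pvCell_stepA g y x hy hx]
        exact pvCellRel_new _ _ _ hcell
      · -- out-of-range column: both defaults
        have hlen : ((pvStepA g).getD y []).length = (g.getD y []).length := by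
          rw [pvGetD_len_map, pvGetD_len_map, pvStepA_rowlens]
        have e1 : ((pvStepA g).getD y []).getD x "" = "" := by
          rw [← pvGetD2, List.getElem?_eq_none (l := (pvStepA g)[y]?.getD [])
            (by rw [← List.getD_eq_getElem?_getD]; omega)]
          rfl
        have e2 : (g.getD y []).getD x "" = "" := by
          rw [← pvGetD2, List.getElem?_eq_none (l := g[y]?.getD [])
            (by rw [← List.getD_eq_getElem?_getD]; omega)]
          rfl
        rw [e1]
        rw [e2] at hcell
        exact hcell
    · -- out-of-range row: both defaults
      have hlen : (pvStepA g).length = g.length := by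
        have := congrArg List.length (pvStepA_rowlens g)
        simpa using this
      have r1 : (pvStepA g).getD y [] = [] := by
        rw [List.getD_eq_getElem?_getD, List.getElem?_eq_none (by omega)]
        rfl
      have r2 : g.getD y [] = [] := by
        rw [List.getD_eq_getElem?_getD, List.getElem?_eq_none (by omega)]
        rfl
      rw [r1]
      rw [r2] at hcell
      exact hcell

-- extensionality for grids with equal row lengths
theorem pvGridExt (g1 g2 : List (List String))
    (hl : g1.map (fun r => r.length) = g2.map (fun r => r.length))
    (hc : ∀ (y x : Nat), y < g2.length → x < (g2.getD y []).length →
      (g1.getD y []).getD x "" = (g2.getD y []).getD x "") : g1 = g2 := by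
  have hlen : g1.length = g2.length := by
    have := congrArg List.length hl
    simpa using this
  apply List.ext_getElem hlen
  intro y hy1 hy2
  have hrl : g1[y].length = g2[y].length := by
    have h1 := pvGetD_len_map g1 y
    have h2 := pvGetD_len_map g2 y
    rw [List.getD_eq_getElem g1 [] hy1] at h1
    rw [List.getD_eq_getElem g2 [] hy2] at h2
    rw [h1, h2, hl]
  apply List.ext_getElem hrl
  intro x hx1 hx2
  have hx2' : x < (g2.getD y []).length := by rwa [List.getD_eq_getElem g2 [] hy2]
  have := hc y x hy2 hx2'
  rw [List.getD_eq_getElem g1 [] hy1, List.getD_eq_getElem g2 [] hy2,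
    List.getD_eq_getElem _ "" hx1, List.getD_eq_getElem _ "" hx2] at this
  exact this

-- two seat cells with the same occupancy bit are the same string
theorem pvSeat_eq_of_occ (a b : String) (ha : pvIsSeat a = true) (hb : pvIsSeat b = true)
    (hocc : (a = "#") ↔ (b = "#")) : a = b := by
  rcases (pvIsSeat_iff a).1 ha with h1 | h1 <;> rcases (pvIsSeat_iff b).1 hb with h2 | h2 <;>
    simp_all

-- B's step over the occupied set tracks A's step over the grid
theorem pvNew_eq {g0 g : List (List String)} (h : pvSkel g0 g) :
    pvNewSet (pvSeats g0) (pvAdj g0) (PySem.Set.ofList (pvOccL g0 g)) =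
      PySem.Set.ofList (pvOccL g0 (pvStepA g)) := by
  unfold pvNewSet pvAdj
  congr 1
  rw [← List.map_prod_left_eq_zip, List.filter_map, List.map_map]
  have hid : ((fun z : (Int × Int) × List (Int × Int) => z.1) ∘
      (fun p : Int × Int => (p, pvDirsB.filterMap (fun d =>
        pvFirstSeat g0 d.1 d.2 (pvRayFuel g0) (p.1 + d.1) (p.2 + d.2))))) = id := by
    funext p; rfl
  rw [hid, List.map_id]
  conv_rhs => rw [pvOccL]
  apply List.filter_congr
  intro p hp
  obtain ⟨y, x, rfl, hy, hx, hseat⟩ := (pvMem_seats g0 p).1 hp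
  have hyg : y < g.length := by rw [pvSkel_length h]; exact hy
  have hxg : x < (g.getD y []).length := by rw [pvSkel_rowlen h]; exact hx
  have hcell := h.2 y x
  have hgseat : pvIsSeat ((g.getD y []).getD x "") = true := by rw [← hcell.1]; exact hseat
  -- compute the stepped cell
  have hstep := pvCell_stepA g y x hyg hxg
  simp only at hstep
  -- compute the n used by B
  have hn := pvCount_eq_neighbors h (y : Int) (x : Int)
  simp only [pvStays, Function.comp_apply]
  rw [hn]
  have hcont := pvContains_occ (g0 := g0) (g := g) ((y : Int), (x : Int)) hp
  simp only at hcont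
  rw [hcont]
  simp only [PySem.List.pyGetD_natCast]
  rw [hstep]
  set seat := (g.getD y []).getD x "" with hseatdef
  set n := neighbors2 g (y : Int) (x : Int) with hndef
  have hFb : (("L" : String) == "#") = false := by decide
  rcases (pvIsSeat_iff seat).1 hgseat with hs | hs <;> rw [hs]
  · -- occupied seat
    by_cases h5 : 5 ≤ n
    · rw [if_neg (show ¬ ("#" : String) = "." from by decide),
        if_pos (show ("#" : String) = "#" ∧ 5 ≤ n from ⟨rfl, h5⟩)]
      simp [hFb, show ¬ n < 5 from by omega]
    · rw [if_neg (show ¬ ("#" : String) = "." from by decide),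
        if_neg (show ¬ (("#" : String) = "#" ∧ 5 ≤ n) from fun hc => h5 hc.2),
        if_neg (show ¬ (("#" : String) = "L" ∧ n = 0) from fun hc => absurd hc.1 (by decide))]
      simp [show n < 5 from by omega]
  · -- empty seat
    by_cases h0 : n = 0
    · rw [if_neg (show ¬ ("L" : String) = "." from by decide),
        if_neg (show ¬ (("L" : String) = "#" ∧ 5 ≤ n) from fun hc => absurd hc.1 (by decide)),
        if_pos (show ("L" : String) = "L" ∧ n = 0 from ⟨rfl, h0⟩)]
      simp [hFb, h0]
    · rw [if_neg (show ¬ ("L" : String) = "." from by decide),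
        if_neg (show ¬ (("L" : String) = "#" ∧ 5 ≤ n) from fun hc => absurd hc.1 (by decide)),
        if_neg (show ¬ (("L" : String) = "L" ∧ n = 0) from fun hc => h0 hc.2)]
      simp [hFb, h0]

-- the fixpoint tests of the two loops agree
theorem pvEqual_iff {g0 g : List (List String)} (h : pvSkel g0 g) :
    PySem.Set.equal (PySem.Set.ofList (pvOccL g0 (pvStepA g)))
      (PySem.Set.ofList (pvOccL g0 g)) = true ↔ pvStepA g = g := by
  constructor
  · intro he
    have hmem := (PySem.Set.equal_iff _ _).1 he
    have hskel2 := pvSkel_step h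
    apply pvGridExt _ _ (by rw [pvStepA_rowlens, h.1, ← h.1])
    intro y x hy hx
    have hcell1 := hskel2.2 y x
    have hcell2 := h.2 y x
    by_cases hseat : pvIsSeat ((g0.getD y []).getD x "") = true
    · have hp : ((y : Int), (x : Int)) ∈ pvSeats g0 := by
        rw [pvMem_seats]
        exact ⟨y, x, rfl, by rwa [← pvSkel_length h], by rwa [← pvSkel_rowlen h], hseat⟩
      have hm := hmem ((y : Int), (x : Int))
      rw [PySem.Set.mem_ofList, PySem.Set.mem_ofList, pvOccL, pvOccL,
        List.mem_filter, List.mem_filter] at hm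
      have hocc : ((pvStepA g).getD y []).getD x "" = "#" ↔ (g.getD y []).getD x "" = "#" := by
        constructor
        · intro hc
          have := (hm.1 ⟨hp, by
            simp only [PySem.List.pyGetD_natCast]; exact beq_iff_eq.mpr hc⟩).2
          simp only [PySem.List.pyGetD_natCast] at this
          exact beq_iff_eq.mp this
        · intro hc
          have := (hm.2 ⟨hp, by
            simp only [PySem.List.pyGetD_natCast]; exact beq_iff_eq.mpr hc⟩).2
          simp only [PySem.List.pyGetD_natCast] at this
          exact beq_iff_eq.mp this
      exact pvSeat_eq_of_occ _ _ (by rw [← hcell1.1]; exact hseat)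
        (by rw [← hcell2.1]; exact hseat) hocc
    · have hF : pvIsSeat ((g0.getD y []).getD x "") = false := by
        revert hseat; cases pvIsSeat ((g0.getD y []).getD x "") <;> simp
      rw [hcell1.2 hF, hcell2.2 hF]
  · intro he
    rw [he]
    exact (PySem.Set.equal_iff _ _).2 (fun q => Iff.rfl)

-- the final counts agree: |occupied| = sum of per-row '#' counts
theorem pvLen_eq {g0 g : List (List String)} (h : pvSkel g0 g) :
    PySem.Set.len (PySem.Set.ofList (pvOccL g0 g)) =
      (((g.map (fun row => PySem.List.count row "#")).sum : Nat) : Int) := by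
  have hnd : (pvOccL g0 g).Nodup := (pvSeats_nodup g0).filter _
  rw [PySem.Set.ofList_eq_self_of_nodup _ hnd]
  have hlen : PySem.Set.len (pvOccL g0 g) = ((pvOccL g0 g).length : Int) := by
    simp [PySem.Set.len]
  -- reduce to a Nat-level count
  have hnat : (pvOccL g0 g).length = (g.map (fun row => PySem.List.count row "#")).sum := by
    unfold pvOccL pvSeats
    rw [List.filter_flatMap, List.length_flatMap]
    -- per-row lengths
    have hrow : ∀ yr ∈ PySem.List.enumerate g0 0,
        ((fun a => (List.filter (fun p => PySem.List.pyGetD (PySem.List.pyGetD g p.1 []) p.2 "" == "#")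
            (List.map (fun xs => (a.1, xs.1))
              (List.filter (fun xs => xs.2 == "#" || xs.2 == "L")
                (PySem.List.enumerate a.2 0)))).length) yr) =
          PySem.List.count (PySem.List.pyGetD g yr.1 []) "#" := by
      intro yr hyr
      rw [PySem.List.mem_enumerate_iff g0 0 yr] at hyr
      obtain ⟨y, hy, rfl⟩ := hyr
      simp only [zero_add]
      rw [List.filter_map, List.length_map, List.filter_filter]
      simp only [Function.comp_apply]
      have hrow0 : g0[y] = g0.getD y [] := (List.getD_eq_getElem g0 [] hy).symm
      have hcongr : List.filter (fun xs =>
            (PySem.List.pyGetD (PySem.List.pyGetD g (y : Int) []) xs.1 "" == "#") &&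
            (xs.2 == "#" || xs.2 == "L"))
          (PySem.List.enumerate g0[y] 0) =
          List.filter (fun xs =>
            (PySem.List.pyGetD (PySem.List.pyGetD g (y : Int) []) xs.1 "" == "#"))
          (PySem.List.enumerate g0[y] 0) := by
        apply List.filter_congr
        intro xs hxs
        rw [PySem.List.mem_enumerate_iff] at hxs
        obtain ⟨x, hx, rfl⟩ := hxs
        simp only [zero_add]
        by_cases hocc : PySem.List.pyGetD (PySem.List.pyGetD g (y : Int) []) (x : Int) "" = "#"
        · -- the occupied cell is a seat in g0 too
          have hcell := h.2 y x
          have hgs : pvIsSeat ((g.getD y []).getD x "") = true := by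
            rw [pvIsSeat_iff]
            left
            simpa [PySem.List.pyGetD_natCast] using hocc
          have h0s : pvIsSeat ((g0.getD y []).getD x "") = true := by rw [hcell.1]; exact hgs
          have hA : (PySem.List.pyGetD (PySem.List.pyGetD g (y : Int) []) (x : Int) "" == "#")
              = true := beq_iff_eq.mpr hocc
          have hB : (g0[y][x] == "#" || g0[y][x] == "L") = true := by
            rw [← hrow0] at h0s
            rw [List.getD_eq_getElem _ "" hx] at h0s
            simpa [pvIsSeat] using h0s
          rw [hA, hB]
          rfl
        · have hA : (PySem.List.pyGetD (PySem.List.pyGetD g (y : Int) []) (x : Int) "" == "#")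
              = false := beq_eq_false_iff_ne.mpr hocc
          rw [hA]
          rfl
      rw [hcongr]
      -- count over the row of g via indices
      have hleng : (PySem.List.pyGetD g (y : Int) []).length = g0[y].length := by
        rw [PySem.List.pyGetD_natCast]
        rw [pvSkel_rowlen h y, hrow0]
      rw [PySem.List.enumerate_eq_map_pyRange g0[y] "", List.filter_map, List.length_map]
      have hcomp : ((fun xs : Int × String =>
            (PySem.List.pyGetD (PySem.List.pyGetD g (y : Int) []) xs.1 "" == "#")) ∘
          (fun j => (j, PySem.List.pyGetD g0[y] j ""))) =
          (fun j => (PySem.List.pyGetD (PySem.List.pyGetD g (y : Int) []) j "" == "#")) := by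
        funext j; rfl
      rw [hcomp]
      have hcount : PySem.List.count (PySem.List.pyGetD g (y : Int) []) "#" =
          (PySem.List.pyRange 0 (PySem.List.len g0[y]) 1).countP
            (fun j => (PySem.List.pyGetD (PySem.List.pyGetD g (y : Int) []) j "" == "#")) := by
        conv_lhs => rw [show (PySem.List.pyGetD g (y : Int) []) =
          (PySem.List.pyRange 0 (PySem.List.len (PySem.List.pyGetD g (y : Int) [])) 1).map
            (fun j => PySem.List.pyGetD (PySem.List.pyGetD g (y : Int) []) j "") from
          (PySem.List.map_pyGetD_pyRange_zero _ "").symm]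
        simp only [PySem.List.count]
        rw [List.count_eq_countP, List.countP_map]
        have : PySem.List.len (PySem.List.pyGetD g (y : Int) []) = PySem.List.len g0[y] := by
          simpa [PySem.List.len] using hleng
        rw [this]
        rfl
      rw [hcount, ← List.countP_eq_length_filter]
    rw [List.map_congr_left hrow]
    -- sum over rows of g
    rw [PySem.List.enumerate_eq_map_pyRange g0 [], List.map_map]
    have hcomp2 : ((fun yr : Int × List String =>
          PySem.List.count (PySem.List.pyGetD g yr.1 []) "#") ∘
        (fun j => (j, PySem.List.pyGetD g0 j []))) =
        ((fun row => PySem.List.count row "#") ∘ (fun j => PySem.List.pyGetD g j [])) := by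
      funext j; rfl
    rw [hcomp2, ← List.map_map]
    have hlg : PySem.List.len g0 = PySem.List.len g := by
      simp [PySem.List.len, pvSkel_length h]
    rw [hlg, PySem.List.map_pyGetD_pyRange_zero g []]
  rw [hlen, hnat]

-- the two loops step through corresponding states
theorem pvLoop_eq {g0 : List (List String)} :
    ∀ (fuel : Nat) (g : List (List String)), pvSkel g0 g →
      pvLoopA fuel g = pvLoopB (pvSeats g0) (pvAdj g0) fuel (PySem.Set.ofList (pvOccL g0 g)) := by
  intro fuel
  induction fuel with
  | zero =>
    intro g hg
    simp only [pvLoopA, pvLoopB]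
    exact (pvLen_eq hg).symm
  | succ f ih =>
    intro g hg
    simp only [pvLoopA, pvLoopB]
    rw [pvNew_eq hg]
    by_cases hfix : pvStepA g = g
    · rw [if_pos hfix, if_pos ((pvEqual_iff hg).2 hfix)]
      rw [hfix, (pvLen_eq hg).symm]
    · rw [if_neg hfix, if_neg (fun hc => hfix ((pvEqual_iff hg).1 hc))]
      exact ih _ (pvSkel_step hg)

-- ===== VERDICT (by name: the statement is the Claim_ definition above) =====
theorem part2_spec : Claim_equal_part2 := by
  intro area _
  show part2 area = part2_alt area
  unfold part2 part2_alt
  have : pvOcc0 area = PySem.Set.ofList (pvOccL area area) := rfl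
  rw [this]
  exact pvLoop_eq _ area (pvSkel_refl area)
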